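-- pv_equiv track=rewrite | github.com/utkuvibing/thermoanalyzer | core/report_generator.py | _select_record_for_dataset
-- ===== SOURCE A (Python) =====
-- def _select_record_for_dataset(records: list[dict], dataset_key: str, analysis_type: str | None) -> dict | None:
--     candidates = [record for record in records if record.get("dataset_key") == dataset_key]
--     if not candidates:
--         return None
--     if analysis_type:
--         normalized = analysis_type.upper()
--         filtered = [record for record in candidates if str(record.get("analysis_type") or "").upper() == normalized]
--         if filtered:
--             stable = [record for record in filtered if record.get("status") == "stable"]
--             return stable[0] if stable else filtered[0]
--     stable = [record for record in candidates if record.get("status") == "stable"]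
--     return stable[0] if stable else candidates[0]
-- ===== SOURCE B (Python) =====
-- def _select_record_for_dataset(records: list[dict], dataset_key: str, analysis_type: str | None) -> dict | None:
--     want = analysis_type.upper() if analysis_type else None
--     cand = cand_stable = amatch = amatch_stable = None
--     for record in records:
--         if record.get("dataset_key") != dataset_key:
--             continue
--         if cand is None:
--             cand = record
--         is_stable = record.get("status") == "stable"
--         if is_stable and cand_stable is None:
--             cand_stable = record
--         if want is not None and str(record.get("analysis_type") or "").upper() == want:
--             if amatch is None:
--                 amatch = record
--             if is_stable and amatch_stable is None:
--                 amatch_stable = record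
--     if cand is None:
--         return None
--     if amatch is not None:
--         return amatch_stable if amatch_stable is not None else amatch
--     return cand_stable if cand_stable is not None else cand
-- ===== Notes on version B (the rewrite author's own statement) =====
-- stated objective: alternative
-- what changed: Replaced A's cascade of list comprehensions (candidates, filtered, two stable sublists, then index [0]) by a single pass over records that maintains four first-seen-wins slots and a final cascade over the slots.
import Mathlib
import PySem

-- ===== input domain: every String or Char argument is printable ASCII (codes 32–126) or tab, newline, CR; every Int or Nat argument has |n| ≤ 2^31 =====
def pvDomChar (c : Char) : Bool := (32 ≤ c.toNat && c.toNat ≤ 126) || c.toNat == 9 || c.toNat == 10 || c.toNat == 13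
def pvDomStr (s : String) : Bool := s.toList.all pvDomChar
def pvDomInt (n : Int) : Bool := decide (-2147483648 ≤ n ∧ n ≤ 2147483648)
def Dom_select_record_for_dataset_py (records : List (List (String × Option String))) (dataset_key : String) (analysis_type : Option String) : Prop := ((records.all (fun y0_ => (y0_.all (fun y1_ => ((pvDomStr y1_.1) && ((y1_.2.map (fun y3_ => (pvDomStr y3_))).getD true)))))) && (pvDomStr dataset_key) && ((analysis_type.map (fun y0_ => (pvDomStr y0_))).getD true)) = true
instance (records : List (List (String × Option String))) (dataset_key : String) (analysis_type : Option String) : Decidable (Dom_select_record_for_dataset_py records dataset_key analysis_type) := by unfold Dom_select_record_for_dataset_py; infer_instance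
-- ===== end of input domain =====

-- B replaces A's cascade of list comprehensions by one pass over `records`
-- maintaining four first-seen-wins slots (objective: alternative decomposition; same O(n)).

-- record.get(k): first matching pair; a stored None and a missing key both give Python None
def pvGetKey (r : List (String × Option String)) (k : String) : Option String :=
  (r.find? (fun p => p.1 == k)).bind (·.2)

-- str(x or ""): None and "" both normalize to ""
def pvOrEmpty (o : Option String) : String := o.getD ""

-- ===== PORT A =====
def select_record_for_dataset_py (records : List (List (String × Option String))) (dataset_key : String) (analysis_type : Option String) : Option (List (String × Option String)) :=
  let candidates := records.filter (fun r => pvGetKey r "dataset_key" == some dataset_key)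
  if candidates.isEmpty then none
  else
    -- `if analysis_type:` with fall-through when `filtered` is empty
    let fromAnalysis : Option (Option (List (String × Option String))) :=
      match analysis_type with
      | none => none
      | some s =>
        if s = "" then none
        else
          let normalized := PySem.Str.upper s
          let filtered := candidates.filter
            (fun r => PySem.Str.upper (pvOrEmpty (pvGetKey r "analysis_type")) == normalized)
          if filtered.isEmpty then none
          else
            let stable := filtered.filter (fun r => pvGetKey r "status" == some "stable")
            some (if stable.isEmpty then filtered.head? else stable.head?)
    match fromAnalysis with
    | some res => res
    | none =>
      let stable := candidates.filter (fun r => pvGetKey r "status" == some "stable")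
      if stable.isEmpty then candidates.head? else stable.head?

-- ===== PORT B =====
-- loop state: (cand, cand_stable, amatch, amatch_stable)
def pvSlotStep (dataset_key : String) (want : Option String)
    (st : Option (List (String × Option String)) × Option (List (String × Option String)) ×
          Option (List (String × Option String)) × Option (List (String × Option String)))
    (r : List (String × Option String)) :
    Option (List (String × Option String)) × Option (List (String × Option String)) ×
    Option (List (String × Option String)) × Option (List (String × Option String)) :=
  if pvGetKey r "dataset_key" == some dataset_key then
    let ⟨c, cs, am, ams⟩ := st
    let c := if c.isNone then some r else c
    let isStable := pvGetKey r "status" == some "stable"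
    let cs := if isStable && cs.isNone then some r else cs
    let hit := match want with
      | some w => PySem.Str.upper (pvOrEmpty (pvGetKey r "analysis_type")) == w
      | none => false
    let am' := if hit && am.isNone then some r else am
    let ams := if hit && isStable && ams.isNone then some r else ams
    (c, cs, am', ams)
  else st

def select_record_for_dataset_py_alt (records : List (List (String × Option String))) (dataset_key : String) (analysis_type : Option String) : Option (List (String × Option String)) :=
  let want : Option String := match analysis_type with
    | some s => if s = "" then none else some (PySem.Str.upper s)
    | none => none
  let ⟨c, cs, am, ams⟩ := records.foldl (pvSlotStep dataset_key want) (none, none, none, none)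
  match c with
  | none => none
  | some _ =>
    match am with
    | some _ => if ams.isSome then ams else am
    | none => if cs.isSome then cs else c

-- ===== PRECONDITION & SPEC =====
def Spec_select_record_for_dataset_py (records : List (List (String × Option String))) (dataset_key : String) (analysis_type : Option String) (out : Option (List (String × Option String))) : Prop := out = select_record_for_dataset_py_alt records dataset_key analysis_type
instance (records : List (List (String × Option String))) (dataset_key : String) (analysis_type : Option String) (out : Option (List (String × Option String))) : Decidable (Spec_select_record_for_dataset_py records dataset_key analysis_type out) := by unfold Spec_select_record_for_dataset_py; infer_instance

-- ===== CLAIM (what is proved, stated in full; the proofs are below) =====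
def Claim_equal_select_record_for_dataset_py : Prop := ∀ (records : List (List (String × Option String))) (dataset_key : String) (analysis_type : Option String), Dom_select_record_for_dataset_py records dataset_key analysis_type → Spec_select_record_for_dataset_py records dataset_key analysis_type (select_record_for_dataset_py records dataset_key analysis_type)

-- ===== LEMMAS AND PROOFS =====

-- each slot of the fold is "initial value, else head of the corresponding filter"
theorem pvSlot_fold (dataset_key : String) (want : Option String)
    (l : List (List (String × Option String)))
    (c cs am ams : Option (List (String × Option String))) :
    l.foldl (pvSlotStep dataset_key want) (c, cs, am, ams) =
      ( c.or (l.filter (fun r => pvGetKey r "dataset_key" == some dataset_key)).head?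
      , cs.or (l.filter (fun r => pvGetKey r "dataset_key" == some dataset_key &&
              pvGetKey r "status" == some "stable")).head?
      , am.or (l.filter (fun r => pvGetKey r "dataset_key" == some dataset_key &&
              (match want with
               | some w => PySem.Str.upper (pvOrEmpty (pvGetKey r "analysis_type")) == w
               | none => false))).head?
      , ams.or (l.filter (fun r => pvGetKey r "dataset_key" == some dataset_key &&
              (match want with
               | some w => PySem.Str.upper (pvOrEmpty (pvGetKey r "analysis_type")) == w
               | none => false) && pvGetKey r "status" == some "stable")).head? ) := by
  induction l generalizing c cs am ams with
  | nil => simp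
  | cons a l ih =>
    simp only [List.foldl_cons, pvSlotStep]
    by_cases hk : (pvGetKey a "dataset_key" == some dataset_key) = true
    · simp only [hk]
      rw [ih]
      cases c <;> cases cs <;> cases am <;> cases ams <;>
        cases hs : (pvGetKey a "status" == some "stable") <;>
        cases hh : (match want with
          | some w => PySem.Str.upper (pvOrEmpty (pvGetKey a "analysis_type")) == w
          | none => false) <;>
        simp_all [Option.or]
    · simp only [hk]
      rw [if_neg (by simp_all), ih]
      simp [hk]

-- bridge: B's combined filter = A's nested filters
theorem pvFilter_assoc (l : List (List (String × Option String))) (p q st : List (String × Option String) → Bool) :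
    l.filter (fun r => p r && q r && st r) = (l.filter (fun r => p r && q r)).filter st := by
  rw [List.filter_filter]
  apply List.filter_congr
  intro r _
  cases p r <;> cases q r <;> cases st r <;> rfl

theorem pvFilter_two (l : List (List (String × Option String))) (p q : List (String × Option String) → Bool) :
    l.filter (fun r => p r && q r) = (l.filter p).filter q := by
  rw [List.filter_filter]
  apply List.filter_congr
  intro r _
  cases p r <;> cases q r <;> rfl

-- ===== VERDICT (by name: the statement is the Claim_ definition above) =====
theorem select_record_for_dataset_py_spec : Claim_equal_select_record_for_dataset_py := by
  intro records dataset_key analysis_type _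
  unfold Spec_select_record_for_dataset_py select_record_for_dataset_py select_record_for_dataset_py_alt
  have hdead : records.filter
      (fun r => pvGetKey r "dataset_key" == some dataset_key && false) = [] := by simp
  have hdead2 : records.filter
      (fun r => pvGetKey r "dataset_key" == some dataset_key && false &&
        (pvGetKey r "status" == some "stable")) = [] := by simp
  rcases analysis_type with _ | s
  · dsimp only
    rw [pvSlot_fold]
    simp only [Option.none_or]
    rw [hdead, hdead2,
        pvFilter_two records (fun r => pvGetKey r "dataset_key" == some dataset_key)
          (fun r => pvGetKey r "status" == some "stable")]
    cases hC : records.filter (fun r => pvGetKey r "dataset_key" == some dataset_key) with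
    | nil => rfl
    | cons a t =>
      cases hS : (a :: t).filter (fun r => pvGetKey r "status" == some "stable") with
      | nil => rfl
      | cons b u => rfl
  · by_cases hs : s = ""
    · subst hs
      dsimp only
      simp only [reduceIte]
      rw [pvSlot_fold]
      simp only [Option.none_or]
      rw [hdead, hdead2,
          pvFilter_two records (fun r => pvGetKey r "dataset_key" == some dataset_key)
            (fun r => pvGetKey r "status" == some "stable")]
      cases hC : records.filter (fun r => pvGetKey r "dataset_key" == some dataset_key) with
      | nil => rfl
      | cons a t =>
        cases hS : (a :: t).filter (fun r => pvGetKey r "status" == some "stable") with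
        | nil => rfl
        | cons b u => rfl
    · dsimp only
      rw [pvSlot_fold]
      simp only [Option.none_or, if_neg hs]
      rw [pvFilter_assoc records (fun r => pvGetKey r "dataset_key" == some dataset_key)
            (fun r => PySem.Str.upper (pvOrEmpty (pvGetKey r "analysis_type")) == PySem.Str.upper s)
            (fun r => pvGetKey r "status" == some "stable"),
          pvFilter_two records (fun r => pvGetKey r "dataset_key" == some dataset_key)
            (fun r => PySem.Str.upper (pvOrEmpty (pvGetKey r "analysis_type")) == PySem.Str.upper s),
          pvFilter_two records (fun r => pvGetKey r "dataset_key" == some dataset_key)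
            (fun r => pvGetKey r "status" == some "stable")]
      cases hC : records.filter (fun r => pvGetKey r "dataset_key" == some dataset_key) with
      | nil => rfl
      | cons a t =>
        cases hF : (a :: t).filter
            (fun r => PySem.Str.upper (pvOrEmpty (pvGetKey r "analysis_type")) == PySem.Str.upper s) with
        | nil =>
          cases hS : (a :: t).filter (fun r => pvGetKey r "status" == some "stable") with
          | nil => rfl
          | cons b u => rfl
        | cons b u =>
          cases hS : (b :: u).filter (fun r => pvGetKey r "status" == some "stable") with
          | nil => rfl
          | cons d v => rfl
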